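-- pv_equiv track=rewrite | github.com/jhj9109/TIL | swea/SC/9490/9490.py | my_pollen
-- ===== SOURCE A (Python) =====
-- def my_pollen(data, x, y, N, M):
--     dx = [-1, 1,  0,  0]
--     dy = [ 0, 0, -1, -1]
--
--
--     res, cnt = data[x][y], data[x][y]
--     for i in range(4):
--         k = 1
--         while 0 <= x+dx[i]*k <= N-1 and 0 <= y+dy[i]*k <= M-1 and k <= cnt:
--             res += data[x+dx[i]*k][y+dy[i]*k]
--             k += 1
--     return res
-- ===== SOURCE B (Python) =====
-- def my_pollen(data, x, y, N, M):
--     # One fused pass: a single loop over the step distance k drives all three rays at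
--     # once, each with a latching stop flag; the duplicated left ray becomes one doubled add.
--     cnt = data[x][y]
--     res = cnt
--     up = down = left = True
--     k = 1
--     while (up or down or left) and k <= cnt:
--         up = up and 0 <= x - k <= N - 1 and 0 <= y <= M - 1
--         if up:
--             res += data[x - k][y]
--         down = down and 0 <= x + k <= N - 1 and 0 <= y <= M - 1
--         if down:
--             res += data[x + k][y]
--         left = left and 0 <= x <= N - 1 and 0 <= y - k <= M - 1
--         if left:
--             res += 2 * data[x][y - k]
--         k += 1
--     return res
-- ===== Notes on version B (the rewrite author's own statement) =====
-- stated objective: alternative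
-- what changed: B replaces A's four separately staged while-loops (one per direction vector, left listed twice) by a single fused loop over the step distance k that advances all rays simultaneously with latching per-ray stop flags and a doubled add for the duplicated left ray.
import Mathlib
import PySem

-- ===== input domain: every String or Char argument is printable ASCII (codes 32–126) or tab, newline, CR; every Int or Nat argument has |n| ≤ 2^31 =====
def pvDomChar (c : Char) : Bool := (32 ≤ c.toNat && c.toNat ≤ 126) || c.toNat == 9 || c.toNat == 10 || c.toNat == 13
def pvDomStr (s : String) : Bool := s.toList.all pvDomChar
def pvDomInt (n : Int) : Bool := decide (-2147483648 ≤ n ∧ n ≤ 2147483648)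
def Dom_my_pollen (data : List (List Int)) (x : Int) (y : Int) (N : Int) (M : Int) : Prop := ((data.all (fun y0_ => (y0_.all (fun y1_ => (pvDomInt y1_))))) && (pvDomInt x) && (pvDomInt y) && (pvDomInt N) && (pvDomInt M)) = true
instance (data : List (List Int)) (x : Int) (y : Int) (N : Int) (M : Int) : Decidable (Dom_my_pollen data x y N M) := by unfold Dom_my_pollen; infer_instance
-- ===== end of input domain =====

-- B fuses A's four staged while-loops into ONE pass over the step distance k that drives
-- all rays at once with latching stop flags, folding the duplicated left ray into a
-- doubled add (objective: alternative; same asymptotic cost).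

-- ===== PORT A =====
-- data[i][j] (Python indexing; Pre_ keeps every access in range, so the defaults are never hit)
def pvCell (data : List (List Int)) (i j : Int) : Int :=
  PySem.List.pyGetD (PySem.List.pyGetD data i []) j 0

-- the inner 'while' loop of A for one direction; fuel bounds the iterations (the guard
-- 'k ≤ cnt' with k starting at 1 means at most cnt.toNat iterations happen)
def pvWhile (data : List (List Int)) (x y N M cnt dxi dyi : Int) :
    Nat → Int → Int → Int
  | 0, _, res => res
  | fuel+1, k, res =>
    if 0 ≤ x + dxi*k ∧ x + dxi*k ≤ N-1 ∧ 0 ≤ y + dyi*k ∧ y + dyi*k ≤ M-1 ∧ k ≤ cnt then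
      pvWhile data x y N M cnt dxi dyi fuel (k+1)
        (res + pvCell data (x + dxi*k) (y + dyi*k))
    else res

def my_pollen (data : List (List Int)) (x : Int) (y : Int) (N : Int) (M : Int) : Int :=
  let dx : List Int := [-1, 1, 0, 0]
  let dy : List Int := [0, 0, -1, -1]
  let cnt := pvCell data x y
  (List.range 4).foldl
    (fun res i => pvWhile data x y N M cnt (dx.getD i 0) (dy.getD i 0) cnt.toNat 1 res)
    (pvCell data x y)

-- ===== PORT B =====
-- Source B's single fused while-loop: state (k, up, down, left, res); each flag latches off
-- the first time its ray's spatial guard fails; fuel bounds the iterations (k ≤ cnt)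
def pvFused (data : List (List Int)) (x y N M cnt : Int) :
    Nat → Int → Bool → Bool → Bool → Int → Int
  | 0, _, _, _, _, res => res
  | fuel+1, k, up, down, left, res =>
    if (up || down || left) ∧ k ≤ cnt then
      let up' := up && decide (0 ≤ x - k ∧ x - k ≤ N - 1 ∧ 0 ≤ y ∧ y ≤ M - 1)
      let res1 := if up' then res + pvCell data (x - k) y else res
      let down' := down && decide (0 ≤ x + k ∧ x + k ≤ N - 1 ∧ 0 ≤ y ∧ y ≤ M - 1)
      let res2 := if down' then res1 + pvCell data (x + k) y else res1
      let left' := left && decide (0 ≤ x ∧ x ≤ N - 1 ∧ 0 ≤ y - k ∧ y - k ≤ M - 1)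
      let res3 := if left' then res2 + 2 * pvCell data x (y - k) else res2
      pvFused data x y N M cnt fuel (k+1) up' down' left' res3
    else res

def my_pollen_alt (data : List (List Int)) (x : Int) (y : Int) (N : Int) (M : Int) : Int :=
  let cnt := pvCell data x y
  pvFused data x y N M cnt cnt.toNat 1 true true true cnt

-- ===== PRECONDITION & SPEC =====
-- Pre_ excludes exactly the inputs on which A raises IndexError: the selected cell
-- data[x][y] must exist, and every cell the up/down rays visit (the first-cell-in-box
-- rays, min(count, reach) steps) must exist in data; the left ray only revisits the
-- selected row left of y and never raises.
def Pre_my_pollen (data : List (List Int)) (x : Int) (y : Int) (N : Int) (M : Int) : Prop :=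
  PySem.Raise.InRange data.length x ∧
  PySem.Raise.InRange (PySem.List.pyGetD data x []).length y ∧
  ((0 ≤ x - 1 ∧ x - 1 ≤ N - 1 ∧ 0 ≤ y ∧ y ≤ M - 1) →
    ∀ k ∈ PySem.List.pyRange 1 (min (PySem.List.pyGetD (PySem.List.pyGetD data x []) y 0) x + 1) 1,
      y < ((PySem.List.pyGetD data (x - k) []).length : Int)) ∧
  ((0 ≤ x + 1 ∧ x + 1 ≤ N - 1 ∧ 0 ≤ y ∧ y ≤ M - 1) →
    (min (PySem.List.pyGetD (PySem.List.pyGetD data x []) y 0) (N - 1 - x) ≤ (data.length : Int) - 1 - x ∧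
     ∀ k ∈ PySem.List.pyRange 1
         (min (min (PySem.List.pyGetD (PySem.List.pyGetD data x []) y 0) (N - 1 - x))
              ((data.length : Int) - 1 - x) + 1) 1,
       y < ((PySem.List.pyGetD data (x + k) []).length : Int)))
instance (data : List (List Int)) (x : Int) (y : Int) (N : Int) (M : Int) : Decidable (Pre_my_pollen data x y N M) := by unfold Pre_my_pollen; infer_instance

def pvWitness_my_pollen : List (List Int) × Int × Int × Int × Int :=
  ([[2, 1], [3, 4]], 0, 1, 2, 2)

def Spec_my_pollen (data : List (List Int)) (x : Int) (y : Int) (N : Int) (M : Int) (out : Int) : Prop := out = my_pollen_alt data x y N M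
instance (data : List (List Int)) (x : Int) (y : Int) (N : Int) (M : Int) (out : Int) : Decidable (Spec_my_pollen data x y N M out) := by unfold Spec_my_pollen; infer_instance

-- ===== CLAIM (what is proved, stated in full; the proofs are below) =====
def Claim_equal_my_pollen : Prop := ∀ (data : List (List Int)) (x : Int) (y : Int) (N : Int) (M : Int), Dom_my_pollen data x y N M → Pre_my_pollen data x y N M → Spec_my_pollen data x y N M (my_pollen data x y N M)

-- ===== LEMMAS AND PROOFS =====

-- A while-loop whose guard holds exactly on the prefix 1..U sums the cells for k = 1..U.
lemma pvWhile_eq_sum (data : List (List Int)) (x y N M cnt dxi dyi U : Int)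
    (hgood : ∀ j : Int, 1 ≤ j → j ≤ U →
      (0 ≤ x + dxi*j ∧ x + dxi*j ≤ N-1 ∧ 0 ≤ y + dyi*j ∧ y + dyi*j ≤ M-1 ∧ j ≤ cnt))
    (hstop : ¬ (0 ≤ x + dxi*(U+1) ∧ x + dxi*(U+1) ≤ N-1 ∧
                0 ≤ y + dyi*(U+1) ∧ y + dyi*(U+1) ≤ M-1 ∧ U+1 ≤ cnt)) :
    ∀ (fuel : Nat) (k res : Int), 1 ≤ k → k ≤ U + 1 → U ≤ k - 1 + fuel →
      pvWhile data x y N M cnt dxi dyi fuel k res =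
        res + ((PySem.List.pyRange k (U+1) 1).map
                 (fun j => pvCell data (x + dxi*j) (y + dyi*j))).sum := by
  intro fuel
  induction fuel with
  | zero =>
    intro k res hk hk' hfu
    rw [PySem.List.pyRange_one_eq_nil (by omega)]
    simp [pvWhile]
  | succ n ih =>
    intro k res hk hk' hfu
    rw [pvWhile]
    by_cases h : k ≤ U
    · rw [if_pos (hgood k hk h)]
      rw [show PySem.List.pyRange k (U+1) 1 = k :: PySem.List.pyRange (k+1) (U+1) 1 from
            PySem.List.pyRange_one_cons (by omega)]
      rw [ih (k+1) _ (by omega) (by omega) (by omega)]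
      simp only [List.map_cons, List.sum_cons]
      ring
    · have hke : k = U + 1 := by omega
      subst hke
      rw [if_neg hstop]
      rw [PySem.List.pyRange_one_eq_nil (by omega)]
      simp

set_option maxHeartbeats 1000000 in
-- B's fused loop: with spatial prefix bounds Su/Sd/Sl (the guard of a ray holds on
-- exactly the steps 1..S), the loop adds each ray's cells for k = 1..min S cnt.
lemma pvFused_eq_sum (data : List (List Int)) (x y N M cnt Su Sd Sl : Int)
    (hgU : ∀ j : Int, 1 ≤ j → j ≤ Su → (0 ≤ x - j ∧ x - j ≤ N-1 ∧ 0 ≤ y ∧ y ≤ M-1))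
    (hsU : ¬ (0 ≤ x - (Su+1) ∧ x - (Su+1) ≤ N-1 ∧ 0 ≤ y ∧ y ≤ M-1))
    (hgD : ∀ j : Int, 1 ≤ j → j ≤ Sd → (0 ≤ x + j ∧ x + j ≤ N-1 ∧ 0 ≤ y ∧ y ≤ M-1))
    (hsD : ¬ (0 ≤ x + (Sd+1) ∧ x + (Sd+1) ≤ N-1 ∧ 0 ≤ y ∧ y ≤ M-1))
    (hgL : ∀ j : Int, 1 ≤ j → j ≤ Sl → (0 ≤ x ∧ x ≤ N-1 ∧ 0 ≤ y - j ∧ y - j ≤ M-1))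
    (hsL : ¬ (0 ≤ x ∧ x ≤ N-1 ∧ 0 ≤ y - (Sl+1) ∧ y - (Sl+1) ≤ M-1)) :
    ∀ (fuel : Nat) (k res : Int), 1 ≤ k → cnt ≤ k - 1 + fuel →
      pvFused data x y N M cnt fuel k
          (decide (k-1 ≤ Su)) (decide (k-1 ≤ Sd)) (decide (k-1 ≤ Sl)) res =
        res
        + ((PySem.List.pyRange k (min Su cnt + 1) 1).map (fun j => pvCell data (x - j) y)).sum
        + ((PySem.List.pyRange k (min Sd cnt + 1) 1).map (fun j => pvCell data (x + j) y)).sum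
        + 2 * ((PySem.List.pyRange k (min Sl cnt + 1) 1).map (fun j => pvCell data x (y - j))).sum := by
  intro fuel
  induction fuel with
  | zero =>
    intro k res hk hfu
    rw [PySem.List.pyRange_one_eq_nil (by omega),
        PySem.List.pyRange_one_eq_nil (by omega),
        PySem.List.pyRange_one_eq_nil (by omega)]
    simp [pvFused]
  | succ n ih =>
    intro k res hk hfu
    rw [pvFused]
    by_cases hc : (k-1 ≤ Su ∨ k-1 ≤ Sd ∨ k-1 ≤ Sl) ∧ k ≤ cnt
    · rw [if_pos (by simp only [Bool.or_eq_true, decide_eq_true_eq]; tauto)]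
      have hup : (decide (k-1 ≤ Su) && decide (0 ≤ x - k ∧ x - k ≤ N-1 ∧ 0 ≤ y ∧ y ≤ M-1))
          = decide (k ≤ Su) := by
        by_cases h1 : k ≤ Su
        · rw [decide_eq_true h1, decide_eq_true (show k - 1 ≤ Su by omega),
              decide_eq_true (hgU k hk h1), Bool.and_true]
        · by_cases h2 : k - 1 ≤ Su
          · have hke : k = Su + 1 := by omega
            subst hke
            rw [decide_eq_false hsU, decide_eq_false h1, Bool.and_false]
          · rw [decide_eq_false h2, decide_eq_false h1, Bool.false_and]
      have hdn : (decide (k-1 ≤ Sd) && decide (0 ≤ x + k ∧ x + k ≤ N-1 ∧ 0 ≤ y ∧ y ≤ M-1))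
          = decide (k ≤ Sd) := by
        by_cases h1 : k ≤ Sd
        · rw [decide_eq_true h1, decide_eq_true (show k - 1 ≤ Sd by omega),
              decide_eq_true (hgD k hk h1), Bool.and_true]
        · by_cases h2 : k - 1 ≤ Sd
          · have hke : k = Sd + 1 := by omega
            subst hke
            rw [decide_eq_false hsD, decide_eq_false h1, Bool.and_false]
          · rw [decide_eq_false h2, decide_eq_false h1, Bool.false_and]
      have hlf : (decide (k-1 ≤ Sl) && decide (0 ≤ x ∧ x ≤ N-1 ∧ 0 ≤ y - k ∧ y - k ≤ M-1))
          = decide (k ≤ Sl) := by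
        by_cases h1 : k ≤ Sl
        · rw [decide_eq_true h1, decide_eq_true (show k - 1 ≤ Sl by omega),
              decide_eq_true (hgL k hk h1), Bool.and_true]
        · by_cases h2 : k - 1 ≤ Sl
          · have hke : k = Sl + 1 := by omega
            subst hke
            rw [decide_eq_false hsL, decide_eq_false h1, Bool.and_false]
          · rw [decide_eq_false h2, decide_eq_false h1, Bool.false_and]
      simp only [hup, hdn, hlf]
      have ih' : ∀ res' : Int,
          pvFused data x y N M cnt n (k+1)
              (decide (k ≤ Su)) (decide (k ≤ Sd)) (decide (k ≤ Sl)) res' =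
            res'
            + ((PySem.List.pyRange (k+1) (min Su cnt + 1) 1).map (fun j => pvCell data (x - j) y)).sum
            + ((PySem.List.pyRange (k+1) (min Sd cnt + 1) 1).map (fun j => pvCell data (x + j) y)).sum
            + 2 * ((PySem.List.pyRange (k+1) (min Sl cnt + 1) 1).map (fun j => pvCell data x (y - j))).sum := by
        intro res'
        have h := ih (k+1) res' (by omega) (by omega)
        simpa [show (k + 1 - 1 : Int) = k by omega] using h
      rw [ih']
      have hstep : ∀ (S : Int) (f : Int → Int),
          ((PySem.List.pyRange k (min S cnt + 1) 1).map f).sum =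
            (if k ≤ S then f k else 0) + ((PySem.List.pyRange (k+1) (min S cnt + 1) 1).map f).sum := by
        intro S f
        by_cases h1 : k ≤ S
        · rw [if_pos h1,
              show PySem.List.pyRange k (min S cnt + 1) 1
                  = k :: PySem.List.pyRange (k+1) (min S cnt + 1) 1 from
                PySem.List.pyRange_one_cons (by omega)]
          simp
        · rw [if_neg h1, PySem.List.pyRange_one_eq_nil (by omega),
              PySem.List.pyRange_one_eq_nil (by omega)]
          simp
      rw [hstep Su, hstep Sd, hstep Sl]
      by_cases h1 : k ≤ Su <;> by_cases h2 : k ≤ Sd <;> by_cases h3 : k ≤ Sl <;>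
        simp [h1, h2, h3] <;> ring
    · rw [if_neg (by simp only [Bool.or_eq_true, decide_eq_true_eq]; tauto)]
      rw [PySem.List.pyRange_one_eq_nil (by omega),
          PySem.List.pyRange_one_eq_nil (by omega),
          PySem.List.pyRange_one_eq_nil (by omega)]
      simp

-- pyRange 1 (max 0 t + 1) = pyRange 1 (t + 1): clipping the bound at 0 changes nothing
-- for a range that starts at 1
lemma pyRange_one_max0 (t : Int) :
    PySem.List.pyRange 1 (max 0 t + 1) 1 = PySem.List.pyRange 1 (t + 1) 1 := by
  by_cases h : 0 ≤ t
  · rw [max_eq_right h]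
  · rw [max_eq_left (by omega), PySem.List.pyRange_one_eq_nil (by omega),
        PySem.List.pyRange_one_eq_nil (by omega)]

-- ===== VERDICT (by name: the statement is the Claim_ definition above) =====
theorem my_pollen_spec : Claim_equal_my_pollen := by
  intro data x y N M _ _
  unfold Spec_my_pollen my_pollen my_pollen_alt
  have h4 : List.range 4 = [0, 1, 2, 3] := rfl
  rw [h4]
  simp only [List.foldl_cons, List.foldl_nil,
    show (([-1,1,0,0] : List Int)).getD 0 0 = -1 from rfl,
    show (([-1,1,0,0] : List Int)).getD 1 0 = 1 from rfl,
    show (([-1,1,0,0] : List Int)).getD 2 0 = 0 from rfl,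
    show (([-1,1,0,0] : List Int)).getD 3 0 = 0 from rfl,
    show (([0,0,-1,-1] : List Int)).getD 0 0 = 0 from rfl,
    show (([0,0,-1,-1] : List Int)).getD 1 0 = 0 from rfl,
    show (([0,0,-1,-1] : List Int)).getD 2 0 = -1 from rfl,
    show (([0,0,-1,-1] : List Int)).getD 3 0 = -1 from rfl]
  set cnt := pvCell data x y with hcnt
  set Su : Int := if x - 1 ≤ N - 1 ∧ 0 ≤ y ∧ y ≤ M - 1 then max 0 x else 0 with hSu
  set Sd : Int := if 0 ≤ x + 1 ∧ 0 ≤ y ∧ y ≤ M - 1 then max 0 (N - 1 - x) else 0 with hSd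
  set Sl : Int := if 0 ≤ x ∧ x ≤ N - 1 ∧ y - 1 ≤ M - 1 then max 0 y else 0 with hSl
  -- A's four while-loops, as closed sums with the same bounds min S cnt
  rw [pvWhile_eq_sum data x y N M cnt (-1) 0 (max 0 (min Su cnt))
        (by intro j h1 h2; rw [hSu] at h2; split_ifs at h2 <;> constructor <;> omega)
        (by rw [hSu]; split_ifs <;> omega)
        cnt.toNat 1 _ (by omega) (by omega) (by omega)]
  rw [pvWhile_eq_sum data x y N M cnt 1 0 (max 0 (min Sd cnt))
        (by intro j h1 h2; rw [hSd] at h2; split_ifs at h2 <;> constructor <;> omega)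
        (by rw [hSd]; split_ifs <;> omega)
        cnt.toNat 1 _ (by omega) (by omega) (by omega)]
  rw [pvWhile_eq_sum data x y N M cnt 0 (-1) (max 0 (min Sl cnt))
        (by intro j h1 h2; rw [hSl] at h2; split_ifs at h2 <;> constructor <;> omega)
        (by rw [hSl]; split_ifs <;> omega)
        cnt.toNat 1 _ (by omega) (by omega) (by omega)]
  rw [pvWhile_eq_sum data x y N M cnt 0 (-1) (max 0 (min Sl cnt))
        (by intro j h1 h2; rw [hSl] at h2; split_ifs at h2 <;> constructor <;> omega)
        (by rw [hSl]; split_ifs <;> omega)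
        cnt.toNat 1 _ (by omega) (by omega) (by omega)]
  -- B's fused loop, as the same closed sums
  have hB := pvFused_eq_sum data x y N M cnt Su Sd Sl
    (by intro j h1 h2; rw [hSu] at h2; split_ifs at h2 <;> constructor <;> omega)
    (by rw [hSu]; split_ifs <;> omega)
    (by intro j h1 h2; rw [hSd] at h2; split_ifs at h2 <;> constructor <;> omega)
    (by rw [hSd]; split_ifs <;> omega)
    (by intro j h1 h2; rw [hSl] at h2; split_ifs at h2 <;> constructor <;> omega)
    (by rw [hSl]; split_ifs <;> omega)
    cnt.toNat 1 cnt (by omega) (by omega)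
  have eu : decide ((1:Int) - 1 ≤ Su) = true := by
    simp only [decide_eq_true_eq]; rw [hSu]; split_ifs <;> omega
  have ed : decide ((1:Int) - 1 ≤ Sd) = true := by
    simp only [decide_eq_true_eq]; rw [hSd]; split_ifs <;> omega
  have el : decide ((1:Int) - 1 ≤ Sl) = true := by
    simp only [decide_eq_true_eq]; rw [hSl]; split_ifs <;> omega
  rw [eu, ed, el] at hB
  rw [hB]
  -- normalise A's direction arithmetic and drop the max-0 clip on the bounds
  have e1 : ∀ j : Int, x + (-1)*j = x - j := fun j => by ring
  have e2 : ∀ j : Int, y + (0:Int)*j = y := fun j => by ring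
  have e3 : ∀ j : Int, x + (0:Int)*j = x := fun j => by ring
  have e4 : ∀ j : Int, y + (-1)*j = y - j := fun j => by ring
  have e5 : ∀ j : Int, x + (1:Int)*j = x + j := fun j => by ring
  simp only [e1, e2, e3, e4, e5]
  rw [pyRange_one_max0 (min Su cnt), pyRange_one_max0 (min Sd cnt),
      pyRange_one_max0 (min Sl cnt)]
  ring
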